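-- pv_equiv track=rewrite | github.com/dkarpelevich/test-checkio | ESCHER/the-stone-wall.py | stone_wall
-- ===== SOURCE A (Python) =====
-- def stone_wall(wall):
--     wall = wall.split('\n')
--     wall = wall[1:len(wall)-1]
--     for j in range(len(wall)):
--         wall[j] = [i for i in wall[j]]
--     wall = list(zip(*wall[::-1]))
--     list_0 = []
--     for i in wall:
--         list_0.append(i.count('0'))
--     return list_0.index(max(list_0))
-- ===== SOURCE B (Python) =====
-- def stone_wall(wall):
--     rows = wall.split('\n')[1:-1]
--     w = min(len(r) for r in rows)
--     cnt = {}
--     for r in rows: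
--         for c, ch in enumerate(r[:w]):
--             if ch == '0':
--                 cnt[c] = cnt.get(c, 0) + 1
--     return max(range(w), key=lambda c: cnt.get(c, 0))
-- ===== Notes on version B (the rewrite author's own statement) =====
-- stated objective: alternative
-- what changed: B replaces A's transpose-then-count pipeline (zip(*rows) columns, a counts list, index(max)) by a single flat scan that accumulates a dict histogram of the column positions of every '0' and then selects the argmax column with max(range(w), key=...), so no column tuples and no counts list are ever built.
import Mathlib
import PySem

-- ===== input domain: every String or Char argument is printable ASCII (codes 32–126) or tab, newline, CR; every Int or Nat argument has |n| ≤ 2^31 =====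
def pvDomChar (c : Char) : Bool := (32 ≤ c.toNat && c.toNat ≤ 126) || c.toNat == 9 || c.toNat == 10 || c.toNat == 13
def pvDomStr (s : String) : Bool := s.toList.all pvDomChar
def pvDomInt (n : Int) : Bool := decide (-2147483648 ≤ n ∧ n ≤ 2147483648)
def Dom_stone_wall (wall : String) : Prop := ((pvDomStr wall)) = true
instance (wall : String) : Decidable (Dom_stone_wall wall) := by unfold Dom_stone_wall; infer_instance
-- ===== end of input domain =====

-- B replaces A's transpose-then-count pipeline (zip(*rows), counts list, index(max)) by a flat
-- scan building a dict histogram of '0' column positions followed by max(range(w), key=...).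

-- ===== PORT A =====
-- measure lemma cited by pyZipAll's decreasing_by
lemma pyZipAll_measure (rows : List (List Char)) (hne : rows ≠ []) (hall : ∀ r ∈ rows, r ≠ []) :
    ((rows.map List.tail).map List.length).sum < (rows.map List.length).sum := by
  induction rows with
  | nil => exact absurd rfl hne
  | cons x xs ih =>
    have hx : x.tail.length < x.length := by
      cases x with
      | nil => exact absurd rfl (hall [] (by simp))
      | cons a t => simp
    by_cases hxs : xs = []
    · subst hxs; simpa using hx
    · have h2 := ih hxs (fun r hr => hall r (List.mem_cons_of_mem _ hr))
      simp only [List.map_cons, List.sum_cons] at *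
      omega

-- zip(*rows), ported by hand (exact: emits the list of heads while every row is nonempty,
-- so it stops at the shortest row; zip of no rows is empty)
def pyZipAll (rows : List (List Char)) : List (List Char) :=
  if h : rows ≠ [] ∧ ∀ r ∈ rows, r ≠ [] then
    rows.map (fun r => r.headD ' ') :: pyZipAll (rows.map List.tail)
  else []
termination_by (rows.map List.length).sum
decreasing_by simpa [List.map_map, Function.comp] using pyZipAll_measure rows h.1 h.2

def stone_wall (wall : String) : Int :=
  let lines := (PySem.Str.split? wall "\n").getD []
  let rows := PySem.List.slice lines (some 1) (some ((lines.length : Int) - 1))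
  let chars := rows.map String.toList
  let cols := pyZipAll chars.reverse
  let list0 := cols.map (fun t => (PySem.List.count t '0' : Int))
  (((PySem.List.index? list0 ((PySem.List.max? list0 (fun x => x)).getD 0)).getD 0 : Nat) : Int)

-- ===== PORT B =====
def stone_wall_alt (wall : String) : Int :=
  let rows := PySem.List.slice ((PySem.Str.split? wall "\n").getD []) (some 1) (some (-1))
  let w := (PySem.List.min? (rows.map (fun r => PySem.Str.len r)) (fun x => x)).getD 0
  let cnt := rows.foldl (fun d r =>
      (PySem.List.enumerate (PySem.Str.slice r none (some w)).toList 0).foldl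
        (fun d p => if p.2 = '0' then d.modify p.1 0 (· + 1) else d) d)
    (PySem.Dict.empty : PySem.Dict Int Int)
  (PySem.List.max? (PySem.List.pyRange 0 w 1) (fun c => cnt.getD c 0)).getD 0

-- ===== PRECONDITION & SPEC =====
-- Pre_ excludes exactly the inputs where A raises ValueError (max of an empty list): no interior
-- rows after dropping the first and last line, or an interior row that is empty (zip truncates to
-- width 0).  B raises ValueError on the same inputs (min of empty / max of empty range).
def Pre_stone_wall (wall : String) : Prop :=
  let lines := (PySem.Str.split? wall "\n").getD []
  let rows := PySem.List.slice lines (some 1) (some ((lines.length : Int) - 1))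
  rows ≠ [] ∧ ∀ r ∈ rows, r.toList ≠ []
instance (wall : String) : Decidable (Pre_stone_wall wall) := by unfold Pre_stone_wall; infer_instance

def pvWitness_stone_wall : String := "##\n00\n##"

def Spec_stone_wall (wall : String) (out : Int) : Prop := out = stone_wall_alt wall
instance (wall : String) (out : Int) : Decidable (Spec_stone_wall wall out) := by unfold Spec_stone_wall; infer_instance

-- ===== CLAIM (what is proved, stated in full; the proofs are below) =====
def Claim_equal_stone_wall : Prop := ∀ (wall : String), Dom_stone_wall wall → Pre_stone_wall wall → Spec_stone_wall wall (stone_wall wall)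

-- ===== LEMMAS AND PROOFS =====
lemma getD_zero_headD (r : List Char) : r.getD 0 ' ' = r.headD ' ' := by cases r <;> rfl

lemma tail_getD (r : List Char) (c : Nat) : r.tail.getD c ' ' = r.getD (c + 1) ' ' := by
  cases r <;> rfl

-- characterisation of pyZipAll at the minimum row length w
lemma zipAll_eq (w : Nat) : ∀ (rows : List (List Char)), rows ≠ [] →
    (∀ r ∈ rows, w ≤ r.length) → (∃ r ∈ rows, r.length = w) →
    pyZipAll rows = (List.range w).map (fun c => rows.map (fun r => r.getD c ' ')) := by
  induction w with
  | zero =>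
    intro rows hne hle hex
    obtain ⟨r, hr, hr0⟩ := hex
    have hcond : ¬ (rows ≠ [] ∧ ∀ r ∈ rows, r ≠ []) := by
      rintro ⟨-, hall⟩
      exact hall r hr (List.eq_nil_of_length_eq_zero hr0)
    unfold pyZipAll
    rw [dif_neg hcond]
    simp
  | succ n ih =>
    intro rows hne hle hex
    have hall : ∀ r ∈ rows, r ≠ [] := by
      intro r hr h
      have := hle r hr
      simp [h] at this
    unfold pyZipAll
    rw [dif_pos ⟨hne, hall⟩]
    have h1 : rows.map List.tail ≠ [] := by simpa using hne
    have h2 : ∀ t ∈ rows.map List.tail, n ≤ t.length := by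
      intro t ht
      obtain ⟨r, hr, rfl⟩ := List.mem_map.mp ht
      have := hle r hr
      simp [List.length_tail]
      omega
    have h3 : ∃ t ∈ rows.map List.tail, t.length = n := by
      obtain ⟨r, hr, hrl⟩ := hex
      exact ⟨r.tail, List.mem_map_of_mem hr, by simp [List.length_tail, hrl]⟩
    rw [ih _ h1 h2 h3, List.range_succ_eq_map]
    simp only [List.map_cons, List.map_map]
    congr 1
    · exact List.map_congr_left (fun r _ => (getD_zero_headD r).symm)
    · apply List.map_congr_left
      intro c _
      simp only [Function.comp]
      exact List.map_congr_left (fun r _ => tail_getD r c)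

-- xs[1:len(xs)-1] = xs[1:-1]
lemma slice_one_neg_one (xs : List String) :
    PySem.List.slice xs (some 1) (some ((xs.length : Int) - 1)) =
    PySem.List.slice xs (some 1) (some (-1)) := by
  cases xs with
  | nil => rfl
  | cons x t =>
    have h : ((x :: t).length : Int) - 1 = ((t.length : Nat) : Int) := by
      simp
    rw [h]
    simp [PySem.List.slice]

-- running max with key, started at k  (what max? computes after its first step)
def pvRunMax {α : Type} (g : α → Int) (k : α) (t : List α) : α :=
  t.foldl (fun m x => if g m < g x then x else m) k

lemma max?_eq_runMax {α : Type} (g : α → Int) (k : α) (t : List α) :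
    PySem.List.max? (k :: t) g = some (pvRunMax g k t) := by
  show List.foldl _ (some k) t = _
  rw [pvRunMax]
  induction t generalizing k with
  | nil => rfl
  | cons x t ih =>
    simp only [List.foldl_cons]
    by_cases h : g k < g x <;> simp [h, ih]

lemma runMax_map (g : α → Int) (k : α) (t : List α) :
    pvRunMax (fun v => v) (g k) (t.map g) = g (pvRunMax g k t) := by
  induction t generalizing k with
  | nil => rfl
  | cons x t ih =>
    simp only [pvRunMax, List.map_cons, List.foldl_cons] at *
    by_cases h : g k < g x <;> simp [h, ih]

lemma le_runMax (g : α → Int) (k : α) (t : List α) : g k ≤ g (pvRunMax g k t) := by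
  induction t generalizing k with
  | nil => exact le_of_eq rfl
  | cons x t ih =>
    simp only [pvRunMax, List.foldl_cons] at *
    by_cases h : g k < g x
    · simp only [if_pos h]; exact le_of_lt (lt_of_lt_of_le h (ih x))
    · simp only [if_neg h]; exact ih k

-- the first maximal element and the first index of the maximal value coincide
lemma first_argmax {α : Type} (g : α → Int) :
    ∀ (t : List α) (k : α), ∃ j, ∃ hj : j < (k :: t).length,
      pvRunMax g k t = (k :: t)[j] ∧
      PySem.List.index? ((k :: t).map g) (g (pvRunMax g k t)) = some j := by
  intro t
  induction t with
  | nil =>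
    intro k
    refine ⟨0, by simp, rfl, ?_⟩
    show PySem.List.index? [g k] (g (pvRunMax g k [])) = some 0
    exact PySem.List.index?_cons_self (g k) []
  | cons x t ih =>
    intro k
    by_cases h : g k < g x
    · -- head is beaten by x: answer lies in x :: t, shifted by one
      obtain ⟨j, hj, he, hi⟩ := ih x
      have hm : pvRunMax g k (x :: t) = pvRunMax g x t := by
        simp [pvRunMax, h]
      have hkne : g k ≠ g (pvRunMax g x t) :=
        ne_of_lt (lt_of_lt_of_le h (le_runMax g x t))
      refine ⟨j + 1, by simpa using hj, by simpa [hm] using he, ?_⟩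
      rw [hm]
      simp only [List.map_cons]
      rw [PySem.List.index?_cons_of_ne _ hkne]
      simp only [List.map_cons] at hi
      rw [hi]; rfl
    · -- head survives x: recurse on k :: t, then re-insert x
      obtain ⟨j, hj, he, hi⟩ := ih k
      have hm : pvRunMax g k (x :: t) = pvRunMax g k t := by
        simp [pvRunMax, h]
      cases j with
      | zero =>
        refine ⟨0, by simp, by simpa [hm] using he, ?_⟩
        have hk : pvRunMax g k t = k := by simpa using he
        rw [hm, hk]
        simp only [List.map_cons]
        rw [PySem.List.index?_cons_self]
      | succ s =>
        -- the maximum is strictly above g k, hence above g x too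
        have hkne : g k ≠ g (pvRunMax g k t) := by
          intro hEq
          simp only [List.map_cons] at hi
          rw [← hEq] at hi
          rw [PySem.List.index?_cons_self] at hi
          exact absurd (Option.some.inj hi) (by omega)
        have hlt : g k < g (pvRunMax g k t) := lt_of_le_of_ne (le_runMax g k t) hkne
        have hxne : g x ≠ g (pvRunMax g k t) :=
          ne_of_lt (lt_of_le_of_lt (not_lt.mp h) hlt)
        have hi' : PySem.List.index? ((k :: t).map g) (g (pvRunMax g k t)) = some (s + 1) := hi
        simp only [List.map_cons] at hi'
        rw [PySem.List.index?_cons_of_ne _ hkne] at hi'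
        obtain ⟨s', hs', hs'1⟩ : ∃ s', PySem.List.index? (t.map g) (g (pvRunMax g k t)) = some s' ∧ s' + 1 = s + 1 := by
          cases hidx : PySem.List.index? (t.map g) (g (pvRunMax g k t)) with
          | none => rw [hidx] at hi'; simp at hi'
          | some s' => rw [hidx] at hi'; exact ⟨s', rfl, Option.some.inj hi'⟩
        refine ⟨s + 2, by simpa using (by omega : s + 2 < t.length + 2 ↔ s + 1 < t.length + 1).mpr (by simpa using hj), ?_, ?_⟩
        · have : (k :: t)[s + 1] = t[s]'(by simpa using hj) := rfl
          rw [hm]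
          simpa using he
        · rw [hm]
          simp only [List.map_cons]
          rw [PySem.List.index?_cons_of_ne _ hkne,
              PySem.List.index?_cons_of_ne _ hxne, hs']
          simp [hs'1]

-- a filtered counting loop is a plain counter over the filtered keys
lemma foldl_if_modify (P : Int × Char → Prop) [DecidablePred P] :
    ∀ (l : List (Int × Char)) (d : PySem.Dict Int Int),
    l.foldl (fun d p => if P p then d.modify p.1 0 (· + 1) else d) d
      = ((l.filter (fun p => decide (P p))).map (·.1)).foldl
          (fun d x => d.modify x 0 (· + 1)) d := by
  intro l
  induction l with
  | nil => intro d; rfl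
  | cons p l ih =>
    intro d
    by_cases h : P p <;> simp [List.foldl_cons, h, ih]

-- the histogram read at key c is the total count of c among the per-row key lists
lemma hist_getD (keyList : String → List Int) (c : Int) :
    ∀ (rows : List String) (d : PySem.Dict Int Int),
    (rows.foldl (fun d r => (keyList r).foldl (fun d x => d.modify x 0 (· + 1)) d) d).getD c 0
      = d.getD c 0 + (rows.map (fun r => (((keyList r).count c : Nat) : Int))).sum := by
  intro rows
  induction rows with
  | nil => intro d; simp
  | cons r rows ih =>
    intro d
    simp only [List.foldl_cons, List.map_cons, List.sum_cons]
    rw [ih, PySem.Dict.getD_foldl_modify_add_one]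
    ring

-- count of column j among the '0'-positions of one truncated row
lemma keylist_count (r : List Char) (n j : Nat) (hn : n ≤ r.length) (hj : j < n) :
    (((PySem.List.enumerate (r.take n) 0).filter (fun p => decide (p.2 = '0'))).map (·.1)).count ((j : Nat) : Int)
      = if r.getD j ' ' = '0' then 1 else 0 := by
  rw [PySem.List.enumerate_eq_map_pyRange (r.take n) ' ', List.filter_map, List.map_map]
  rw [show ((fun p : Int × Char => p.1) ∘ fun i => (i, PySem.List.pyGetD (r.take n) i ' ')) = id from rfl, List.map_id]
  have hlen : PySem.List.len (r.take n) = ((n : Nat) : Int) := by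
    simp [PySem.List.len]; omega
  rw [hlen]
  have hget : PySem.List.pyGetD (r.take n) ((j : Nat) : Int) ' ' = r.getD j ' ' := by
    rw [PySem.List.pyGetD_natCast]
    simp [List.getD, List.getElem?_take_of_lt hj]
  have hqj : ((fun p : Int × Char => decide (p.2 = '0')) ∘ fun i => (i, PySem.List.pyGetD (r.take n) i ' ')) ((j : Nat) : Int)
      = decide (r.getD j ' ' = '0') := by
    simp only [Function.comp_apply, hget]
  by_cases h0 : r.getD j ' ' = '0'
  · rw [List.count_filter (by rw [hqj]; simp only [List.getD] at h0; simp [h0]), if_pos h0, PySem.List.pyRange_zero_natCast]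
    refine List.count_eq_one_of_mem ?_ (List.mem_map_of_mem (List.mem_range.mpr hj))
    apply List.Nodup.map _ (List.nodup_range (n := n))
    intro a b h; simpa using h
  · rw [if_neg h0]
    apply List.count_eq_zero_of_not_mem
    intro hmem
    have h2 := (List.mem_filter.mp hmem).2
    rw [hqj] at h2
    simp only [List.getD] at h0
    simp [h0] at h2

lemma main_eq (wall : String) (hpre : Pre_stone_wall wall) :
    stone_wall wall = stone_wall_alt wall := by
  simp only [Pre_stone_wall] at hpre
  obtain ⟨hne, hnem⟩ := hpre
  simp only [stone_wall, stone_wall_alt]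
  rw [slice_one_neg_one] at hne hnem ⊢
  set rows := PySem.List.slice ((PySem.Str.split? wall "\n").getD []) (some 1) (some (-1)) with hrows
  clear_value rows
  clear hrows
  -- the minimum row length n
  have hlne : rows.map (fun r => PySem.Str.len r) ≠ [] := by simpa using hne
  obtain ⟨m, hm⟩ : ∃ m, PySem.List.min? (rows.map (fun r => PySem.Str.len r)) (fun x => x) = some m := by
    cases h : PySem.List.min? (rows.map (fun r => PySem.Str.len r)) (fun x => x) with
    | none => exact absurd ((PySem.List.min?_eq_none_iff _ _).mp h) hlne
    | some m => exact ⟨m, rfl⟩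
  have hmin := PySem.List.min?_isMin hm
  obtain ⟨r0, hr0, hr0len⟩ := List.mem_map.mp (PySem.List.min?_mem hm)
  set n := r0.toList.length with hn
  have hmval : m = ((n : Nat) : Int) := by
    rw [← hr0len]; simp [PySem.Str.len_eq, hn]
  have hub : ∀ r ∈ rows, n ≤ r.toList.length := by
    intro r hr
    have h1 := hmin _ (List.mem_map_of_mem hr)
    rw [hmval] at h1
    simp only [PySem.Str.len_eq] at h1
    exact_mod_cast h1
  have hnpos : 0 < n := by
    rcases Nat.eq_zero_or_pos n with h0 | h; swap
    · exact h
    · exact absurd (List.eq_nil_of_length_eq_zero (hn ▸ h0)) (hnem r0 hr0)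
  -- A's column list via zipAll
  have hcne : (rows.map String.toList).reverse ≠ [] := by simpa using hne
  have hcle : ∀ t ∈ (rows.map String.toList).reverse, n ≤ t.length := by
    intro t ht
    rw [List.mem_reverse] at ht
    obtain ⟨r, hr, rfl⟩ := List.mem_map.mp ht
    exact hub r hr
  have hcex : ∃ t ∈ (rows.map String.toList).reverse, t.length = n :=
    ⟨r0.toList, List.mem_reverse.mpr (List.mem_map_of_mem hr0), rfl⟩
  clear_value n
  rw [zipAll_eq _ _ hcne hcle hcex, hm]
  simp only [Option.getD_some, List.map_map]
  -- A's per-column value f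
  set f : Nat → Int := fun j => ((rows.countP (fun r => decide (r.toList.getD j ' ' = '0')) : Nat) : Int) with hf
  have hA : (List.range n).map ((fun t => (PySem.List.count t '0' : Int)) ∘ fun c => (rows.map String.toList).reverse.map (fun r => r.getD c ' ')) = (List.range n).map f := by
    apply List.map_congr_left
    intro j _
    simp only [Function.comp, PySem.List.count_eq, List.map_reverse, List.count_reverse, List.map_map, hf]
    have : ((rows.map (fun r => r.toList.getD j ' ')).count '0') = rows.countP (fun r => decide (r.toList.getD j ' ' = '0')) := by
      rw [List.count_eq_countP, List.countP_map]
      apply List.countP_congr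
      intro r _
      simp
    exact_mod_cast this
  rw [hA, hmval]
  -- B's histogram value at column ↑j equals f j
  set cnt := rows.foldl (fun d r =>
      (PySem.List.enumerate (PySem.Str.slice r none (some ((n : Nat) : Int))).toList 0).foldl
        (fun d p => if p.2 = '0' then d.modify p.1 0 (· + 1) else d) d)
    (PySem.Dict.empty : PySem.Dict Int Int) with hcnt
  set g : Int → Int := fun c => cnt.getD c 0 with hg
  have hslice : ∀ r : String, (PySem.Str.slice r none (some ((n : Nat) : Int))).toList = r.toList.take n := by
    intro r
    rw [PySem.Str.toList_slice, PySem.Chars.slice_eq_listSlice, PySem.List.slice_to_natCast]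
  have hgj : ∀ j < n, g ((j : Nat) : Int) = f j := by
    intro j hj
    rw [hg, hcnt]
    beta_reduce
    have hrw : (fun (d : PySem.Dict Int Int) (r : String) =>
        (PySem.List.enumerate (PySem.Str.slice r none (some ((n : Nat) : Int))).toList 0).foldl
          (fun d p => if p.2 = '0' then d.modify p.1 0 (· + 1) else d) d)
        = fun d r => (((PySem.List.enumerate (r.toList.take n) 0).filter (fun p => decide (p.2 = '0'))).map (·.1)).foldl (fun d x => d.modify x 0 (· + 1)) d := by
      funext d r
      rw [hslice r, foldl_if_modify (fun p => p.2 = '0')]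
    rw [hrw, hist_getD]
    simp only [PySem.Dict.getD_empty, zero_add]
    have : rows.map (fun r => (((((PySem.List.enumerate (r.toList.take n) 0).filter (fun p => decide (p.2 = '0'))).map (·.1)).count ((j : Nat) : Int) : Nat) : Int))
        = rows.map (fun r => if r.toList.getD j ' ' = '0' then (1 : Int) else 0) := by
      apply List.map_congr_left
      intro r hr
      rw [keylist_count r.toList n j (hub r hr) hj]
      split_ifs <;> simp
    rw [this, PySem.List.sum_map_ite_one_zero']
  -- bridge: both pick the first argmax over columns 0..n-1
  rw [PySem.List.pyRange_zero_natCast]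
  have hfg : List.map f (List.range n) = (List.map (fun k : Nat => (k : Int)) (List.range n)).map g := by
    rw [List.map_map]
    apply List.map_congr_left
    intro i hi'
    exact (hgj i (List.mem_range.mp hi')).symm
  rw [hfg]
  cases hks : List.map (fun k : Nat => (k : Int)) (List.range n) with
  | nil =>
    exfalso
    have : (List.map (fun k : Nat => (k : Int)) (List.range n)).length = n := by simp
    rw [hks] at this
    simp at this
    omega
  | cons k t =>
    obtain ⟨j, hj, he, hi⟩ := first_argmax g t k
    rw [max?_eq_runMax g _ _]
    simp only [List.map_cons] at hi ⊢
    rw [max?_eq_runMax (fun x => x) _ _]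
    have hRM : pvRunMax (fun v => v) (g k) (t.map g) = g (pvRunMax g k t) := runMax_map g k t
    rw [hRM]
    simp only [Option.getD_some]
    rw [hi]
    simp only [Option.getD_some]
    rw [he]
    have hlen : (k :: t).length = n := by
      rw [← hks]; simp
    have : (k :: t)[j] = ((j : Nat) : Int) := by
      have h1 : (k :: t)[j] = (List.map (fun k : Nat => (k : Int)) (List.range n))[j]'(by rw [hks]; exact hj) := by
        simp only [hks]
      rw [h1]
      simp
    rw [this]

-- ===== VERDICT (by name: the statement is the Claim_ definition above) =====
theorem stone_wall_spec : Claim_equal_stone_wall := by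
  intro wall _ hpre
  show stone_wall wall = stone_wall_alt wall
  exact main_eq wall hpre
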